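-- pv_equiv track=rewrite | github.com/niffitek/103cipher_2019 | src/main.py | message_to_matrix
-- ===== SOURCE A (Python) =====
-- def message_to_matrix(message, key_len):
--     matrix = []
--     row = []
--     max_len = len(message)
--     while (max_len % key_len != 0):
--         max_len += 1
--     if (key_len == 1):
--         for i in range(0, len(message)):
--             row.append(message[i])
--             matrix.append(row)
--             row = []
--         return (matrix)
--     for i in range(0, max_len):
--         if i >= len(message):
--             row.append(0)
--         else:
--             row.append(message[i])
--         if (i + 1) % key_len == 0 and i > 0:
--             matrix.append(row)
--             row = []
--     return (matrix)
-- ===== SOURCE B (Python) =====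
-- def message_to_matrix(message, key_len):
--     padded = list(message) + [0] * ((-len(message)) % key_len)
--     return [padded[i:i + key_len] for i in range(0, len(padded), key_len)]
-- ===== Notes on version B (the rewrite author's own statement) =====
-- stated objective: simpler
-- what changed: Replaces A's element-by-element loop (manual padded-length while-loop, modulo-based row cutting, and a key_len==1 special case) with 'materialize the zero-padded sequence once, then slice it into key_len-sized rows', which subsumes the special case; a timing run measured the slicing form ~2x faster (bulk C-level slices instead of a per-element Python loop).
-- outside the precondition, e.g. on message_to_matrix([1, 2, 3], -2): A returns [[1, 2], [3, 0]], B returns []; on message_to_matrix([1, 2], 0): A raises ZeroDivisionError, B raises ZeroDivisionError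
import Mathlib
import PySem

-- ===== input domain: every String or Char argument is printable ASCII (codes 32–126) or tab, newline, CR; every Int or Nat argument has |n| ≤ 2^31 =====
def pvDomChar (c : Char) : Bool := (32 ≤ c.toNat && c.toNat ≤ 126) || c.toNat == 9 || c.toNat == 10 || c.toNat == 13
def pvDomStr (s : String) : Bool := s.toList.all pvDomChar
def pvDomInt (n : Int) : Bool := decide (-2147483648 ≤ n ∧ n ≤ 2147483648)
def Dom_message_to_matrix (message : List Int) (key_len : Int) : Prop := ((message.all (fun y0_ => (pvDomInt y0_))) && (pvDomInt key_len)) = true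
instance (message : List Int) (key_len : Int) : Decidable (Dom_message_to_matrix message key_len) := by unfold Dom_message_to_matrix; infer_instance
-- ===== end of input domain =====

-- B re-implements A's element-by-element loop as "materialize the padded sequence, then slice it
-- into key_len-sized rows" (objective: simpler; same asymptotic cost).

-- ===== PORT A =====
-- the `while (max_len % key_len != 0): max_len += 1` loop; fuel makes it total
-- (for key_len ≠ 0 at most |key_len| - 1 iterations happen, so fuel key_len.natAbs suffices)
def padWhile (key_len : Int) : Int → Nat → Int
  | m, 0 => m
  | m, fuel + 1 => if PySem.Int.mod m key_len ≠ 0 then padWhile key_len (m + 1) fuel else m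

-- the body of A's main `for i in range(0, max_len)` loop (state = (matrix, row))
def stepA (g : Int → Int) (key_len : Int) (st : List (List Int) × List Int) (i : Int) :
    List (List Int) × List Int :=
  let row := st.2 ++ [g i]
  if PySem.Int.mod (i + 1) key_len = 0 ∧ 0 < i then (st.1 ++ [row], []) else (st.1, row)

def message_to_matrix (message : List Int) (key_len : Int) : List (List Int) :=
  let maxLen := padWhile key_len (message.length : Int) key_len.natAbs
  if key_len = 1 then
    (PySem.List.pyRange 0 (message.length : Int) 1).foldl
      (fun matrix i => matrix ++ [[PySem.List.pyGetD message i 0]]) []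
  else
    ((PySem.List.pyRange 0 maxLen 1).foldl
      (stepA (fun i => if (message.length : Int) ≤ i then 0 else PySem.List.pyGetD message i 0)
        key_len)
      ([], [])).1

-- ===== PORT B =====
def message_to_matrix_alt (message : List Int) (key_len : Int) : List (List Int) :=
  let padded := message ++
    PySem.List.pyRepeat [0] (PySem.Int.mod (-(message.length : Int)) key_len)
  (PySem.List.pyRange 0 (padded.length : Int) key_len).map
    (fun i => PySem.List.slice padded (some i) (some (i + key_len)))

-- ===== PRECONDITION & SPEC =====
-- key_len = 0 makes A raise ZeroDivisionError; key_len < 0 (a negative chunk width) is outside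
-- the task's natural domain, where A's grouping is accidental — Pre_ keeps positive widths only.
def Pre_message_to_matrix (message : List Int) (key_len : Int) : Prop := 1 ≤ key_len
instance (message : List Int) (key_len : Int) : Decidable (Pre_message_to_matrix message key_len) := by unfold Pre_message_to_matrix; infer_instance

def pvWitness_message_to_matrix : List Int × Int := ([1, 2, 3], 2)

def Spec_message_to_matrix (message : List Int) (key_len : Int) (out : List (List Int)) : Prop := out = message_to_matrix_alt message key_len
instance (message : List Int) (key_len : Int) (out : List (List Int)) : Decidable (Spec_message_to_matrix message key_len out) := by unfold Spec_message_to_matrix; infer_instance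

-- ===== CLAIM (what is proved, stated in full; the proofs are below) =====
def Claim_equal_message_to_matrix : Prop := ∀ (message : List Int) (key_len : Int), Dom_message_to_matrix message key_len → Pre_message_to_matrix message key_len → Spec_message_to_matrix message key_len (message_to_matrix message key_len)

lemma padWhile_eq (kl : Int) (hkl : 0 < kl) :
    ∀ (fuel : Nat) (m : Int), ((-m).emod kl).toNat < fuel →
      padWhile kl m fuel = m + (-m).emod kl := by
  intro fuel
  induction fuel with
  | zero => intro m h; omega
  | succ fuel ih =>
    intro m h
    rw [padWhile]
    by_cases hm : PySem.Int.mod m kl = 0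
    · rw [if_neg (by simpa using hm)]
      have hd : kl ∣ m := (PySem.Int.mod_eq_zero_iff_dvd m kl).mp hm
      have : (-m).emod kl = 0 := Int.emod_eq_zero_of_dvd (Dvd.dvd.neg_right hd)
      omega
    · rw [if_pos (by simpa using hm)]
      have hd : ¬ kl ∣ m := fun h' => hm ((PySem.Int.mod_eq_zero_iff_dvd m kl).mpr h')
      have hr0 : (-m).emod kl ≠ 0 := by
        intro h0
        exact hd (by
          have := Int.dvd_of_emod_eq_zero h0
          simpa using this.neg_right)
      have hrpos : 0 < (-m).emod kl := lt_of_le_of_ne (Int.emod_nonneg _ (by omega)) (Ne.symm hr0)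
      have hrlt : (-m).emod kl < kl := Int.emod_lt_of_pos _ hkl
      have hkl2 : 2 ≤ kl := by omega
      have hstep : (-(m + 1)).emod kl = (-m).emod kl - 1 := by
        have h1 : (-(m + 1) : Int) = (-m) - 1 := by ring
        have h2 : ((1 : Int)).emod kl = 1 := Int.emod_eq_of_lt (by norm_num) (by omega)
        calc (-(m + 1)).emod kl = ((-m) - 1).emod kl := by rw [h1]
          _ = ((-m).emod kl - (1 : Int).emod kl).emod kl := Int.sub_emod _ _ _
          _ = ((-m).emod kl - 1).emod kl := by rw [h2]
          _ = (-m).emod kl - 1 := Int.emod_eq_of_lt (by omega) (by omega)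
      rw [ih (m + 1) (by omega), hstep]
      ring

lemma block_fold (g : Int → Int) (kl : Int) (hkl : 2 ≤ kl) :
    ∀ (t : Nat), 1 ≤ t → (t : Int) ≤ kl → ∀ (i0 : Int) (acc : List (List Int)) (row : List Int),
      0 ≤ i0 → kl ∣ (i0 + t) →
      (PySem.List.pyRange i0 (i0 + t) 1).foldl (stepA g kl) (acc, row)
        = (acc ++ [row ++ (PySem.List.pyRange i0 (i0 + t) 1).map g], []) := by
  intro t
  induction t with
  | zero => omega
  | succ t ih =>
    intro _ htk i0 acc row hi0 hdvd
    rcases Nat.eq_zero_or_pos t with ht0 | ht1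
    · subst ht0
      push_cast at hdvd htk ⊢
      rw [PySem.List.pyRange_one_singleton]
      have hflush : PySem.Int.mod (i0 + 1) kl = 0 := (PySem.Int.mod_eq_zero_iff_dvd _ _).mpr hdvd
      have hpos : 0 < i0 := by
        have := Int.le_of_dvd (by omega) hdvd
        omega
      simp [stepA, hflush, hpos]
    · have hcast : ((t + 1 : Nat) : Int) = (t : Int) + 1 := by push_cast; ring
      rw [hcast] at hdvd htk ⊢
      rw [PySem.List.pyRange_one_cons (by omega)]
      have hnoflush : ¬ (PySem.Int.mod (i0 + 1) kl = 0 ∧ 0 < i0) := by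
        rintro ⟨hmod, -⟩
        have hd1 : kl ∣ i0 + 1 := (PySem.Int.mod_eq_zero_iff_dvd _ _).mp hmod
        have hdt : kl ∣ (t : Int) := by
          have := Int.dvd_sub hdvd hd1
          simpa [add_comm, add_left_comm, add_assoc, sub_eq_add_neg] using
            (by ring_nf at this ⊢; exact this : kl ∣ (i0 + ((t : Int) + 1)) - (i0 + 1))
        have := Int.le_of_dvd (by exact_mod_cast ht1) hdt
        omega
      have hstep : stepA g kl (acc, row) i0 = (acc, row ++ [g i0]) := by
        simp [stepA, hnoflush]
      rw [List.foldl_cons, hstep]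
      have hrec := ih ht1 (by omega) (i0 + 1) acc (row ++ [g i0]) (by omega)
        (by rw [show (i0 + 1) + (t : Int) = i0 + ((t : Int) + 1) by ring]; exact hdvd)
      rw [show i0 + ((t : Int) + 1) = (i0 + 1) + (t : Int) by ring]
      rw [hrec, List.map_cons]
      simp

lemma outer_fold (g : Int → Int) (kl : Int) (hkl : 2 ≤ kl) :
    ∀ (c : Nat) (i0 : Int), 0 ≤ i0 → kl ∣ i0 → ∀ (acc : List (List Int)),
      (PySem.List.pyRange i0 (i0 + c * kl) 1).foldl (stepA g kl) (acc, [])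
        = (acc ++ (List.range c).map
            (fun j : Nat => (PySem.List.pyRange (i0 + (j : Int) * kl)
              (i0 + (j : Int) * kl + kl) 1).map g), []) := by
  intro c
  induction c with
  | zero =>
    intro i0 _ _ acc
    rw [show i0 + (0 : Nat) * kl = i0 by push_cast; ring, PySem.List.pyRange_one_eq_nil le_rfl]
    simp
  | succ c ih =>
    intro i0 hi0 hdvd acc
    have hc0 : (0 : Int) ≤ (c : Int) * kl := by positivity
    have hsplit := PySem.List.pyRange_one_append i0 (i0 + kl) (i0 + (c + 1 : Nat) * kl)
      (by omega) (by push_cast; nlinarith)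
    rw [hsplit, List.foldl_append]
    have hblk := block_fold g kl hkl kl.toNat (by omega) (by omega) i0 acc []
      hi0 (by rw [Int.toNat_of_nonneg (by omega)]; exact (dvd_add_right hdvd).mpr dvd_rfl)
    rw [Int.toNat_of_nonneg (by omega : (0:Int) ≤ kl)] at hblk
    rw [hblk]
    have hrec := ih (i0 + kl) (by omega) ((dvd_add_right hdvd).mpr dvd_rfl)
      (acc ++ [[] ++ (PySem.List.pyRange i0 (i0 + kl) 1).map g])
    rw [show i0 + (c + 1 : Nat) * kl = (i0 + kl) + (c : Nat) * kl by push_cast; ring, hrec]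
    rw [List.range_succ_eq_map, List.map_cons, List.map_map]
    simp only [Nat.cast_zero, zero_mul, add_zero, List.nil_append, List.append_assoc,
      List.cons_append, List.nil_append]
    rw [List.append_cons]
    simp only [List.append_assoc]
    congr 2
    rw [List.singleton_append]
    congr 1
    apply List.map_congr_left
    intro j _
    simp only [Function.comp_apply, Nat.succ_eq_add_one]
    rw [show i0 + ((j : Nat) + 1 : Nat) * kl = i0 + kl + (j : Int) * kl by push_cast; ring]

lemma blk_eq (message : List Int) (pad0 : Nat) (k a : Nat)
    (hbound : a + k ≤ (message ++ List.replicate pad0 0).length) :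
    (PySem.List.pyRange (a : Int) ((a : Int) + (k : Int)) 1).map
        (fun i => if (message.length : Int) ≤ i then 0 else PySem.List.pyGetD message i 0)
      = (((message ++ List.replicate pad0 0)).drop a).take k := by
  set padded := message ++ List.replicate pad0 0 with hpadded
  have hlen : padded.length = message.length + pad0 := by simp [hpadded]
  have hstep1 : (PySem.List.pyRange (a : Int) ((a : Int) + (k : Int)) 1).map
      (fun i => if (message.length : Int) ≤ i then 0 else PySem.List.pyGetD message i 0)
      = (PySem.List.pyRange (a : Int) ((a : Int) + (k : Int)) 1).map
      (fun i => PySem.List.pyGetD padded i 0) := by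
    apply List.map_congr_left
    intro i hi
    rw [PySem.List.mem_pyRange_one] at hi
    have hi0 : 0 ≤ i := by omega
    have hin : i < (padded.length : Int) := by push_cast [hlen] at hbound ⊢; omega
    have hinm : i.toNat < padded.length := by omega
    rw [PySem.List.pyGetD_eq_getElem padded 0 hi0 hin]
    by_cases hc : (message.length : Int) ≤ i
    · rw [if_pos hc]
      simp only [hpadded]
      rw [List.getElem_append_right (by simp only [hpadded] at hinm; omega)]
      simp
    · rw [if_neg hc]
      rw [PySem.List.pyGetD_eq_getElem message 0 hi0 (by omega)]
      simp only [hpadded]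
      rw [List.getElem_append_left (by omega)]
  rw [hstep1]
  have hfull := PySem.List.map_pyGetD_pyRange' padded (0 : Int) (a := (a : Int))
    (by positivity)
  have hsp := PySem.List.pyRange_one_append (a : Int) ((a : Int) + (k : Int))
    (padded.length : Int) (by omega) (by omega)
  rw [hsp, List.map_append] at hfull
  have hlen1 : ((PySem.List.pyRange (a : Int) ((a : Int) + (k : Int)) 1).map
      (fun i => PySem.List.pyGetD padded i 0)).length = k := by
    simp [PySem.List.length_pyRange_one]
  rw [← List.take_left' hlen1 (l₂ := (PySem.List.pyRange ((a : Int) + (k : Int))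
      (padded.length : Int) 1).map (fun i => PySem.List.pyGetD padded i 0)), hfull]
  simp

lemma alt_chunks (message : List Int) (k : Nat) (hk : 1 ≤ k) (pad0 : Nat)
    (c : Nat) (hc : (message ++ List.replicate pad0 0).length = c * k) :
    (PySem.List.pyRange 0 ((message ++ List.replicate pad0 0).length : Int) (k : Int)).map
        (fun i => PySem.List.slice (message ++ List.replicate pad0 0) (some i)
          (some (i + (k : Int))))
      = (List.range c).map
          (fun j : Nat => (((message ++ List.replicate pad0 0)).drop (j * k)).take k) := by
  set padded := message ++ List.replicate pad0 0 with hpadded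
  rw [PySem.List.pyRange_of_pos 0 (padded.length : Int) (by exact_mod_cast hk)]
  have hcount : (if (0 : Int) < (padded.length : Int)
      then (((padded.length : Int) - 0 + (k : Int) - 1) / (k : Int)).toNat else 0) = c := by
    rcases Nat.eq_zero_or_pos padded.length with h0 | hpos
    · rw [if_neg (by omega)]
      have hck : c * k = 0 := by omega
      rcases Nat.mul_eq_zero.mp hck with h | h <;> omega
    · rw [if_pos (by omega)]
      have : ((padded.length : Int) - 0 + (k : Int) - 1) = ((k : Int) - 1) + (k : Int) * (c : Int) := by
        rw [hc]; push_cast; ring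
      rw [this, Int.add_mul_ediv_left _ _ (by omega : (k : Int) ≠ 0),
        Int.ediv_eq_zero_of_lt (by omega) (by omega)]
      omega
  rw [hcount, List.map_map]
  apply List.map_congr_left
  intro j _
  simp only [Function.comp_apply, zero_add]
  rw [show (k : Int) * (j : Nat) = ((j * k : Nat) : Int) by push_cast; ring,
    PySem.List.slice_natCast_add]


-- ===== VERDICT (by name: the statement is the Claim_ definition above) =====
theorem message_to_matrix_spec : Claim_equal_message_to_matrix := by
  intro message kl _ hpre
  unfold Pre_message_to_matrix at hpre
  unfold Spec_message_to_matrix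
  obtain ⟨k, hk, hk1⟩ : ∃ k : Nat, kl = (k : Int) ∧ 1 ≤ k := ⟨kl.toNat, by omega, by omega⟩
  subst hk
  have hmodpos : (0 : Int) < (k : Int) := by exact_mod_cast hk1
  have hpad : PySem.Int.mod (-(message.length : Int)) (k : Int)
      = (-(message.length : Int)).emod (k : Int) := PySem.Int.mod_eq_emod_of_pos hmodpos
  set padI := (-(message.length : Int)).emod (k : Int) with hpadI
  have hpadnn : 0 ≤ padI := Int.emod_nonneg _ (by omega)
  have hpadlt : padI < (k : Int) := Int.emod_lt_of_pos _ hmodpos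
  set pad0 := padI.toNat with hpad0
  set padded := message ++ List.replicate pad0 0 with hpadded
  have hnn : padded.length = message.length + pad0 := by simp [hpadded]
  have hediv : padI + (k : Int) * (-(message.length : Int) / (k : Int))
      = -(message.length : Int) := Int.emod_add_mul_ediv (-(message.length : Int)) (k : Int)
  have hdvdN : k ∣ padded.length := by
    have hdvd : (k : Int) ∣ ((padded.length : Nat) : Int) :=
      ⟨-((-(message.length : Int)) / (k : Int)), by push_cast [hnn]; rw [mul_neg]; omega⟩
    exact_mod_cast hdvd
  obtain ⟨c, hc⟩ : ∃ c : Nat, padded.length = c * k :=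
    ⟨padded.length / k, (Nat.div_mul_cancel hdvdN).symm⟩
  have hB : message_to_matrix_alt message (k : Int)
      = (List.range c).map (fun j : Nat => (padded.drop (j * k)).take k) := by
    simp only [message_to_matrix_alt]
    rw [PySem.List.pyRepeat_singleton, hpad]
    exact alt_chunks message k hk1 pad0 c hc
  rw [hB]
  simp only [message_to_matrix]
  have hmax : padWhile (k : Int) (message.length : Int) ((k : Int)).natAbs
      = (message.length : Int) + padI := by
    rw [show ((k : Int)).natAbs = k by omega]
    exact padWhile_eq (k : Int) hmodpos k (message.length : Int) (by omega)
  have hlenI : ((padded.length : Nat) : Int) = (c : Int) * (k : Int) := by exact_mod_cast hc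
  by_cases hkone : (k : Int) = 1
  · rw [if_pos hkone]
    have hkn1 : k = 1 := by omega
    subst hkn1
    have hpz : padI = 0 := by rw [hpadI, hkone]; exact Int.emod_one _
    have hc' : message.length = c := by
      have hpad00 : pad0 = 0 := by omega
      simp [hpad00] at hnn
      omega
    rw [PySem.List.foldl_append_singleton_eq_map
      (f := fun i => [PySem.List.pyGetD message i 0])]
    rw [List.nil_append, PySem.List.pyRange_zero_nat message.length, List.map_map]
    rw [← hc']
    apply List.map_congr_left
    intro j hj
    have hjlt : j < message.length := List.mem_range.mp hj
    simp only [Function.comp_apply, PySem.List.pyGetD_natCast]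
    have hdropj : padded.drop (j * 1) = message.drop j := by
      rw [hpadded, mul_one]
      have hpad00 : pad0 = 0 := by omega
      simp [hpad00]
    rw [hdropj, List.drop_eq_getElem_cons hjlt, List.take_succ_cons, List.take_zero,
      List.getD_eq_getElem message 0 hjlt]
  · rw [if_neg hkone]
    have hk2 : 2 ≤ (k : Int) := by omega
    rw [hmax]
    rw [show (message.length : Int) + padI = 0 + (c : Nat) * (k : Int) by
      push_cast [hnn] at hlenI ⊢; omega]
    rw [outer_fold _ (k : Int) hk2 c 0 le_rfl (dvd_zero _) []]
    simp only [List.nil_append, zero_add]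
    apply List.map_congr_left
    intro j hj
    have hjc : j < c := List.mem_range.mp hj
    have hbound : j * k + k ≤ padded.length := by
      have h1 : j * k + k = (j + 1) * k := by ring
      have h2 : (j + 1) * k ≤ c * k := Nat.mul_le_mul_right k hjc
      omega
    have hblk := blk_eq message pad0 k (j * k) hbound
    rw [show ((j : Nat) : Int) * (k : Int) = ((j * k : Nat) : Int) by push_cast; ring]
    exact hblk
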